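-- pv_equiv track=rewrite | github.com/leeyounwoo/Algorithm | 프로그래머스/카카오/Level2/3. 문자열 압축.py | solution
-- ===== SOURCE A (Python) =====
-- def solution(s):
--     answer = len(s)
--
--     for i in range(1, len(s)//2+1):
--         flag = ''
--         temp = ''
--         number = 1
--         for start in range(0, len(s), i):
--             now = s[start:start+i]
--             if start == 0:
--                 temp = s[start:start+i]
--                 number = 1
--             else:
--                 # 문자열이 같음
--                 if temp == now:
--                     number += 1
--                 # 문자열이 다름
--                 else:
--                     # 1개만 있음
--                     if number == 1:
--                         flag += temp
--                     # 2개 이상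
--                     else:
--                         flag += str(number) + temp
--                     number = 1
--                     temp = now
--         # 마지막꺼 추가
--         if temp == now:
--             if number == 1:
--                 flag += temp
--             else:
--                 flag += str(number) + temp
--         else:
--             flag += temp
--         cnt = len(flag)
--         if answer > cnt:
--             answer = cnt
--
--     return answer
-- ===== SOURCE B (Python) =====
-- def solution(s):
--     # One character-level pass per window size: a running mismatch counter between
--     # positions p and p+i detects equal adjacent chunks; lengths are summed
--     # arithmetically, no substring is ever sliced and no compressed string built.
--     n = len(s)
--     best = n
--     for i in range(1, n // 2 + 1):
--         rem = n % i
--         total = rem            # a shorter tail chunk can never merge with a full one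
--         run = 1
--         mis = 0
--         for p in range(n - rem - i):
--             if s[p] != s[p + i]:
--                 mis += 1
--             if (p + 1) % i == 0:     # finished comparing one chunk pair
--                 if mis == 0:
--                     run += 1
--                 else:
--                     total += i + (len(str(run)) if run > 1 else 0)
--                     run = 1
--                 mis = 0
--         total += i + (len(str(run)) if run > 1 else 0)
--         if total < best:
--             best = total
--     return best
-- ===== Notes on version B (the rewrite author's own statement) =====
-- stated objective: alternative
-- what changed: A slices a substring chunk per position, compares whole chunks and builds the compressed string to measure it; B never slices or builds a string: for each window size it makes one character-level pass with a running mismatch counter between positions p and p+i, detecting equal adjacent chunks at block boundaries and summing run lengths arithmetically.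
import Mathlib
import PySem

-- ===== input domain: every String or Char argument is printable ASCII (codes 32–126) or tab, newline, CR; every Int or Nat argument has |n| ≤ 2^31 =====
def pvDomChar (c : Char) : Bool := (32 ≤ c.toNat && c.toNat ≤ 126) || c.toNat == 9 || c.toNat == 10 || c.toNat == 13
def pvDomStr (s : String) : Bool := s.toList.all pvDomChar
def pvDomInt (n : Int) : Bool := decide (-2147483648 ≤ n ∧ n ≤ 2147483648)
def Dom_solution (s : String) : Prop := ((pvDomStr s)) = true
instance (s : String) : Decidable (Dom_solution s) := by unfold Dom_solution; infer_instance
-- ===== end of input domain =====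

-- B replaces A's slice-compare-and-build-a-string state machine by one character-level
-- pass per window size with a running mismatch counter; lengths are summed arithmetically
-- (objective: alternative; no speed claim).

-- ===== PORT A =====
def aStep (cs : List Char) (i : Int) (st : List Char × List Char × Int × List Char)
    (start : Int) : List Char × List Char × Int × List Char :=
  let now := PySem.List.slice cs (some start) (some (start + i))
  if start = 0 then (st.1, now, 1, now)
  else if st.2.1 = now then (st.1, st.2.1, st.2.2.1 + 1, now)
  else if st.2.2.1 = 1 then (st.1 ++ st.2.1, now, 1, now)
  else (st.1 ++ PySem.Int.toChars st.2.2.1 ++ st.2.1, now, 1, now)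

def solution (s : String) : Int :=
  let cs := s.toList
  (PySem.List.pyRange 1 (PySem.Int.floordiv (PySem.Str.len s) 2 + 1) 1).foldl
    (fun answer i =>
      let st := (PySem.List.pyRange 0 (PySem.Str.len s) i).foldl (aStep cs i) ([], [], 1, [])
      let flag :=
        if st.2.1 = st.2.2.2 then
          if st.2.2.1 = 1 then st.1 ++ st.2.1 else st.1 ++ PySem.Int.toChars st.2.2.1 ++ st.2.1
        else st.1 ++ st.2.1
      if answer > (flag.length : Int) then (flag.length : Int) else answer)
    (PySem.Str.len s)

-- ===== PORT B =====
-- Source B's inner loop body: state (total, run, mis); indices p and p+i are always in range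
-- (0 ≤ p < n - rem - i), so pyGetD with a dummy default is exact for Python's s[p]
def bInner (cs : List Char) (i : Int) (st : Int × Int × Int) (p : Int) : Int × Int × Int :=
  let mis := if PySem.List.pyGetD cs p ' ' ≠ PySem.List.pyGetD cs (p + i) ' '
             then st.2.2 + 1 else st.2.2
  if PySem.Int.mod (p + 1) i = 0 then
    if mis = 0 then (st.1, st.2.1 + 1, 0)
    else (st.1 + i + (if st.2.1 > 1 then PySem.Str.len (PySem.Int.toStr st.2.1) else 0), 1, 0)
  else (st.1, st.2.1, mis)

def solution_alt (s : String) : Int :=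
  let cs := s.toList
  let n : Int := PySem.Str.len s
  (PySem.List.pyRange 1 (PySem.Int.floordiv n 2 + 1) 1).foldl
    (fun best i =>
      let rem := PySem.Int.mod n i
      let st := (PySem.List.pyRange 0 (n - rem - i) 1).foldl (bInner cs i) (rem, 1, 0)
      let total := st.1 + i + (if st.2.1 > 1 then PySem.Str.len (PySem.Int.toStr st.2.1) else 0)
      if total < best then total else best)
    n

-- ===== PRECONDITION & SPEC =====
def Spec_solution (s : String) (out : Int) : Prop := out = solution_alt s
instance (s : String) (out : Int) : Decidable (Spec_solution s out) := by unfold Spec_solution; infer_instance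

-- ===== CLAIM (what is proved, stated in full; the proofs are below) =====
def Claim_equal_solution : Prop := ∀ (s : String), Dom_solution s → Spec_solution s (solution s)

-- ===== LEMMAS AND PROOFS =====

-- the j-th chunk of size I
def chunkN (cs : List Char) (I j : Nat) : List Char := (cs.drop (j * I)).take I

-- length of one emitted run: chunk text plus the digit count when the run repeats
def emitLen (t : List Char) (k : Nat) : Int :=
  (t.length : Int) + if 1 < k then ((PySem.Int.toChars (k : Int)).length : Int) else 0

def emitI (I k : Nat) : Int :=
  (I : Int) + if 1 < k then ((PySem.Int.toChars (k : Int)).length : Int) else 0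

-- compressed length of the remaining chunk list, current run (t, k)
def rleLenFrom (t : List Char) (k : Nat) : List (List Char) → Int
  | [] => emitLen t k
  | c :: l => if t = c then rleLenFrom t (k + 1) l else emitLen t k + rleLenFrom c 1 l

-- same, over the booleans "chunk j equals chunk j+1"
def bLen (I k : Nat) : List Bool → Int
  | [] => emitI I k
  | b :: l => if b then bLen I (k + 1) l else emitI I k + bLen I 1 l

def eqsL (cs : List Char) (I j d : Nat) : List Bool :=
  (List.range' j d).map (fun t => decide (chunkN cs I t = chunkN cs I (t + 1)))

-- number of mismatching positions among a, a+1, …, a+t-1 (each compared with +I)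
def misCnt (cs : List Char) (I a t : Nat) : Int :=
  ((List.range t).countP (fun u => cs.getD (a + u) ' ' ≠ cs.getD (a + u + I) ' ') : Int)

-- B's final emit applied to the loop state
def finB (I : Nat) (st : Int × Int × Int) : Int :=
  st.1 + (I : Int) + (if st.2.1 > 1 then PySem.Str.len (PySem.Int.toStr st.2.1) else 0)

-- A's loop body for the non-first chunks
def aStep' (st : List Char × List Char × Int × List Char) (now : List Char) :
    List Char × List Char × Int × List Char :=
  if st.2.1 = now then (st.1, st.2.1, st.2.2.1 + 1, now)
  else if st.2.2.1 = 1 then (st.1 ++ st.2.1, now, 1, now)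
  else (st.1 ++ PySem.Int.toChars st.2.2.1 ++ st.2.1, now, 1, now)

def postLen (st : List Char × List Char × Int × List Char) : Int :=
  ((if st.2.1 = st.2.2.2 then
      if st.2.2.1 = 1 then st.1 ++ st.2.1 else st.1 ++ PySem.Int.toChars st.2.2.1 ++ st.2.1
    else st.1 ++ st.2.1).length : Int)


lemma aStep'_foldl_postLen (l : List (List Char)) : ∀ (f t : List Char) (k : Nat), 1 ≤ k →
    postLen (l.foldl aStep' (f, t, (k : Int), t)) = (f.length : Int) + rleLenFrom t k l := by
  induction l with
  | nil =>
    intro f t k hk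
    by_cases h1 : k = 1
    · subst h1; simp [postLen, rleLenFrom, emitLen]
    · have h1' : ¬ ((k : Int) = 1) := by exact_mod_cast h1
      have h2 : 1 < k := by omega
      simp [postLen, rleLenFrom, emitLen, h1', h2]
      omega
  | cons c l ih =>
    intro f t k hk
    by_cases h : t = c
    · subst h
      have hstep : aStep' (f, t, (k : Int), t) t = (f, t, ((k + 1 : Nat) : Int), t) := by
        simp [aStep']
      rw [List.foldl_cons, hstep, ih f t (k + 1) (by omega)]
      simp [rleLenFrom]
    · by_cases h1 : k = 1
      · subst h1
        have hstep : aStep' (f, t, ((1 : Nat) : Int), t) c = (f ++ t, c, ((1 : Nat) : Int), c) := by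
          simp [aStep', h]
        rw [List.foldl_cons, hstep, ih (f ++ t) c 1 (by omega)]
        simp [rleLenFrom, h, emitLen]
        omega
      · have h1' : ¬ ((k : Int) = 1) := by exact_mod_cast h1
        have hstep : aStep' (f, t, (k : Int), t) c
            = (f ++ PySem.Int.toChars (k : Int) ++ t, c, ((1 : Nat) : Int), c) := by
          simp [aStep', h, h1']
        rw [List.foldl_cons, hstep, ih _ c 1 (by omega)]
        simp [rleLenFrom, h, emitLen]
        omega

lemma pyRange_pos_cons (a b s : Int) (hs : 0 < s) (hab : a < b) :
    PySem.List.pyRange a b s = a :: PySem.List.pyRange (a + s) b s := by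
  rw [PySem.List.pyRange_of_pos _ _ hs, PySem.List.pyRange_of_pos _ _ hs]
  have hnum : b - a + s - 1 = (b - a - 1) + 1 * s := by ring
  have hdiv : (b - a + s - 1) / s = (b - a - 1) / s + 1 := by
    rw [hnum, Int.add_mul_ediv_right _ _ (by omega : s ≠ 0)]
  have hnn : 0 ≤ (b - a - 1) / s := Int.ediv_nonneg (by omega) (by omega)
  have hm : ((b - a + s - 1) / s).toNat = ((b - a - 1) / s).toNat + 1 := by omega
  rw [if_pos hab, hm]
  by_cases hab2 : a + s < b
  · rw [if_pos hab2]
    have : b - (a + s) + s - 1 = b - a - 1 := by ring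
    rw [this, List.range_succ_eq_map, List.map_cons, List.map_map]
    congr 1
    · simp
    · apply List.map_congr_left
      intro k _
      simp [Nat.succ_eq_add_one]
      ring
  · rw [if_neg hab2]
    have hz : (b - a - 1) / s = 0 := by
      apply Int.ediv_eq_zero_of_lt (by omega) (by omega)
    rw [hz]
    simp

lemma chunks_eq (cs : List Char) (I : Nat) (hI : 0 < I) (hN : 0 < cs.length) :
    (PySem.List.pyRange 0 (cs.length : Int) (I : Int)).map
        (fun j => PySem.List.slice cs (some j) (some (j + (I : Int))))
      = (List.range ((cs.length + I - 1) / I)).map (chunkN cs I) := by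
  have hIpos : (0 : Int) < (I : Int) := by exact_mod_cast hI
  rw [PySem.List.pyRange_of_pos _ _ hIpos]
  rw [if_pos (by exact_mod_cast hN)]
  have hc : ((cs.length : Int) - 0 + (I : Int) - 1) = ((cs.length + I - 1 : Nat) : Int) := by
    push_cast [Nat.cast_sub (by omega : 1 ≤ cs.length + I)]; ring
  rw [hc]
  have hdiv : (((cs.length + I - 1 : Nat) : Int) / (I : Int)) = (((cs.length + I - 1) / I : Nat) : Int) := by
    exact_mod_cast (Int.natCast_div _ _).symm
  rw [hdiv, Int.toNat_natCast, List.map_map]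
  apply List.map_congr_left
  intro k _
  show PySem.List.slice cs (some (0 + (I : Int) * (k : Int))) (some (0 + (I : Int) * (k : Int) + (I : Int))) = chunkN cs I k
  have : (0 + (I : Int) * (k : Int)) = ((k * I : Nat) : Int) := by push_cast; ring
  rw [this, PySem.List.slice_natCast_add]
  rfl

lemma misCnt_succ (cs : List Char) (I a t : Nat) :
    misCnt cs I a (t + 1)
      = misCnt cs I a t + (if cs.getD (a + t) ' ' ≠ cs.getD (a + t + I) ' ' then 1 else 0) := by
  unfold misCnt
  rw [List.range_succ, List.countP_append]
  push_cast
  simp [List.countP_cons]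

lemma not_dvd_mid (I u : Nat) (h0 : 0 < u) (hu : u < I) (j : Nat) :
    ¬ ((I : Int) ∣ ((j * I + u : Nat) : Int)) := by
  intro hdvd
  have : I ∣ (j * I + u) := by exact_mod_cast hdvd
  have h2 : I ∣ u := (Nat.dvd_add_right (Dvd.intro j (by ring))).mp this
  exact absurd (Nat.le_of_dvd h0 h2) (by omega)

lemma bInner_partial (cs : List Char) (I : Nat) :
    ∀ (t : Nat), t < I → ∀ (j : Nat) (tot run mis : Int),
    (PySem.List.pyRange ((j * I : Nat) : Int) ((j * I + t : Nat) : Int) 1).foldl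
        (bInner cs (I : Int)) (tot, run, mis)
      = (tot, run, mis + misCnt cs I (j * I) t) := by
  intro t
  induction t with
  | zero =>
    intro _ j tot run mis
    rw [PySem.List.pyRange_one_eq_nil (by simp)]
    simp [misCnt]
  | succ t ih =>
    intro ht j tot run mis
    have hsplit : ((j * I + (t + 1) : Nat) : Int) = ((j * I + t : Nat) : Int) + 1 := by push_cast; ring
    rw [hsplit, PySem.List.pyRange_one_succ_right (by exact_mod_cast Nat.le_add_right _ _),
        List.foldl_append, ih (by omega) j tot run mis]
    have hmod : ¬ (PySem.Int.mod (((j * I + t : Nat) : Int) + 1) (I : Int) = 0) := by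
      intro h
      have := (PySem.Int.mod_eq_zero_iff_dvd _ _).mp h
      have hc : (((j * I + t : Nat) : Int) + 1) = ((j * I + (t + 1) : Nat) : Int) := by push_cast; ring
      rw [hc] at this
      exact not_dvd_mid I (t + 1) (by omega) ht j this
    have hgi : ((j * I + t : Nat) : Int) + (I : Int) = ((j * I + t + I : Nat) : Int) := by push_cast; ring
    rw [List.foldl_cons, List.foldl_nil]
    have hstep : bInner cs (I : Int) (tot, run, mis + misCnt cs I (j * I) t) ((j * I + t : Nat) : Int)
        = (tot, run, (mis + misCnt cs I (j * I) t)
            + (if cs.getD (j * I + t) ' ' ≠ cs.getD (j * I + t + I) ' ' then 1 else 0)) := by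
      simp only [bInner, PySem.List.pyGetD_natCast, hgi]
      rw [if_neg hmod]
      split_ifs with h
      · rfl
      · simp
    rw [hstep, misCnt_succ]
    simp [add_assoc]

lemma misCnt_zero_iff (cs : List Char) (I j : Nat) (hI : 0 < I)
    (hlen : (j + 2) * I ≤ cs.length) :
    (misCnt cs I (j * I) I = 0) ↔ chunkN cs I j = chunkN cs I (j + 1) := by
  have hb : j * I + I + I ≤ cs.length := by
    have : (j + 2) * I = j * I + I + I := by ring
    omega
  have hj1 : (j + 1) * I = j * I + I := by ring
  unfold misCnt
  rw [show ((((List.range I).countP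
      (fun u => cs.getD (j * I + u) ' ' ≠ cs.getD (j * I + u + I) ' ') : Nat) : Int) = 0
      ↔ (List.range I).countP
      (fun u => cs.getD (j * I + u) ' ' ≠ cs.getD (j * I + u + I) ' ') = 0) from by omega]
  rw [List.countP_eq_zero]
  have hl1 : (chunkN cs I j).length = I := by
    simp [chunkN]; omega
  have hl2 : (chunkN cs I (j + 1)).length = I := by
    simp [chunkN, hj1]; omega
  constructor
  · intro h
    apply List.ext_getElem (by rw [hl1, hl2])
    intro u hu _
    have hu' : u < I := by rwa [hl1] at hu
    have := h u (by simpa using hu')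
    simp only [decide_not, Bool.not_eq_eq_eq_not, Bool.not_true, decide_eq_false_iff_not,
      not_not] at this
    have e1 : j * I + u < cs.length := by omega
    have e2 : j * I + u + I < cs.length := by omega
    rw [List.getD_eq_getElem cs ' ' e1, List.getD_eq_getElem cs ' ' e2] at this
    simp only [chunkN, List.getElem_take, List.getElem_drop]
    convert this using 2
    omega
  · intro h u hu
    simp only [List.mem_range] at hu
    have e1 : j * I + u < cs.length := by omega
    have e2 : j * I + u + I < cs.length := by omega
    have hgg := List.getElem_of_eq h (by omega : u < (chunkN cs I j).length)
    simp only [chunkN, List.getElem_take, List.getElem_drop] at hgg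
    simp only [decide_not, Bool.not_eq_eq_eq_not, Bool.not_true, decide_eq_false_iff_not, not_not]
    rw [List.getD_eq_getElem cs ' ' e1, List.getD_eq_getElem cs ' ' e2]
    convert hgg using 2
    omega

lemma bInner_block (cs : List Char) (I : Nat) (hI : 0 < I)
    (j : Nat) (hlen : (j + 2) * I ≤ cs.length) (tot : Int) (run : Nat) :
    (PySem.List.pyRange ((j * I : Nat) : Int) (((j + 1) * I : Nat) : Int) 1).foldl
        (bInner cs (I : Int)) (tot, (run : Int), 0)
      = if chunkN cs I j = chunkN cs I (j + 1) then (tot, (run : Int) + 1, 0)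
        else (tot + emitI I run, 1, 0) := by
  have hsplit : (((j + 1) * I : Nat) : Int) = ((j * I + (I - 1) : Nat) : Int) + 1 := by
    push_cast [Nat.cast_sub (by omega : 1 ≤ I)]; ring
  rw [hsplit, PySem.List.pyRange_one_succ_right (by exact_mod_cast Nat.le_add_right _ _),
      List.foldl_append, bInner_partial cs I (I - 1) (by omega) j tot (run : Int) 0,
      List.foldl_cons, List.foldl_nil]
  have hmod : PySem.Int.mod (((j * I + (I - 1) : Nat) : Int) + 1) (I : Int) = 0 := by
    rw [PySem.Int.mod_eq_zero_iff_dvd]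
    have hc : (((j * I + (I - 1) : Nat) : Int) + 1) = ((I : Int)) * ((j : Int) + 1) := by
      push_cast [Nat.cast_sub (by omega : 1 ≤ I)]; ring
    exact ⟨_, hc⟩
  have hgi : ((j * I + (I - 1) : Nat) : Int) + (I : Int) = ((j * I + (I - 1) + I : Nat) : Int) := by
    push_cast; ring
  have hmis : (0 : Int) + misCnt cs I (j * I) (I - 1)
      + (if cs.getD (j * I + (I - 1)) ' ' ≠ cs.getD (j * I + (I - 1) + I) ' ' then 1 else 0)
      = misCnt cs I (j * I) I := by
    rw [show I = (I - 1) + 1 from by omega, misCnt_succ]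
    rw [show (I - 1) + 1 - 1 = I - 1 from by omega]
    ring
  simp only [bInner, PySem.List.pyGetD_natCast, hgi]
  rw [if_pos hmod]
  have hform : (if cs.getD (j * I + (I - 1)) ' ' ≠ cs.getD (j * I + (I - 1) + I) ' '
      then (0 : Int) + misCnt cs I (j * I) (I - 1) + 1
      else (0 : Int) + misCnt cs I (j * I) (I - 1)) = misCnt cs I (j * I) I := by
    rw [← hmis]; split_ifs <;> ring
  rw [hform]
  by_cases hceq : chunkN cs I j = chunkN cs I (j + 1)
  · rw [if_pos ((misCnt_zero_iff cs I j hI hlen).mpr hceq), if_pos hceq]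
  · rw [if_neg (fun h => hceq ((misCnt_zero_iff cs I j hI hlen).mp h)), if_neg hceq]
    have hlenstr : PySem.Str.len (PySem.Int.toStr (run : Int))
        = ((PySem.Int.toChars (run : Int)).length : Int) := by
      rw [PySem.Str.len_eq, PySem.Int.toList_toStr]
    have hgt : ((run : Int) > 1) ↔ (1 < run) := by exact_mod_cast Iff.rfl
    simp only [emitI, hlenstr]
    split_ifs with h1 h2 h2
    · simp [add_assoc]
    · exact absurd (hgt.mp h1) h2
    · exact absurd (hgt.mpr h2) h1
    · simp

lemma strlen_toStr (k : Nat) :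
    PySem.Str.len (PySem.Int.toStr (k : Int)) = ((PySem.Int.toChars (k : Int)).length : Int) := by
  rw [PySem.Str.len_eq, PySem.Int.toList_toStr]

lemma finB_emit (I : Nat) (tot : Int) (run : Nat) :
    finB I (tot, (run : Int), 0) = tot + emitI I run := by
  unfold finB emitI
  have hgt : ((run : Int) > 1) ↔ (1 < run) := by exact_mod_cast Iff.rfl
  simp only [strlen_toStr]
  split_ifs with h1 h2 h2
  · ring
  · exact absurd (hgt.mp h1) h2
  · exact absurd (hgt.mpr h2) h1
  · ring

lemma bInner_blocks (cs : List Char) (I : Nat) (hI : 0 < I) :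
    ∀ (d j : Nat) (tot : Int) (run : Nat), 1 ≤ run → (j + d + 1) * I ≤ cs.length →
    finB I ((PySem.List.pyRange ((j * I : Nat) : Int) (((j + d) * I : Nat) : Int) 1).foldl
        (bInner cs (I : Int)) (tot, (run : Int), 0))
      = tot + bLen I run (eqsL cs I j d) := by
  intro d
  induction d with
  | zero =>
    intro j tot run hrun hlen
    rw [show ((j + 0) * I : Nat) = j * I from by ring]
    rw [PySem.List.pyRange_one_eq_nil (le_refl _), List.foldl_nil, finB_emit]
    simp [eqsL, bLen]
  | succ d ih =>
    intro j tot run hrun hlen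
    have hmono1 : j * I ≤ (j + 1) * I := Nat.mul_le_mul_right _ (by omega)
    have hmono2 : (j + 1) * I ≤ (j + (d + 1)) * I := Nat.mul_le_mul_right _ (by omega)
    rw [PySem.List.pyRange_one_append ((j * I : Nat) : Int) (((j + 1) * I : Nat) : Int)
        (((j + (d + 1)) * I : Nat) : Int) (by exact_mod_cast hmono1) (by exact_mod_cast hmono2),
      List.foldl_append,
      bInner_block cs I hI j (by nlinarith) tot run]
    have heqs : eqsL cs I j (d + 1)
        = (decide (chunkN cs I j = chunkN cs I (j + 1))) :: eqsL cs I (j + 1) d := by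
      unfold eqsL
      rw [List.range'_succ, List.map_cons]
    rw [heqs]
    by_cases hceq : chunkN cs I j = chunkN cs I (j + 1)
    · rw [if_pos hceq]
      have hc1 : ((run : Int) + 1) = ((run + 1 : Nat) : Int) := by push_cast; ring
      have hc2 : (((j + (d + 1)) * I : Nat) : Int) = ((((j + 1) + d) * I : Nat) : Int) := by
        norm_cast; ring
      rw [hc1, hc2, ih (j + 1) tot (run + 1) (by omega) (by rw [show (j + 1 + d + 1) = (j + (d+1) + 1) from by ring]; exact hlen)]
      simp [bLen, hceq]
    · rw [if_neg hceq]
      have hc2 : (((j + (d + 1)) * I : Nat) : Int) = ((((j + 1) + d) * I : Nat) : Int) := by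
        norm_cast; ring
      rw [hc2]
      have hih := ih (j + 1) (tot + emitI I run) 1 (le_refl _)
        (by rw [show (j + 1 + d + 1) = (j + (d+1) + 1) from by ring]; exact hlen)
      rw [Nat.cast_one] at hih
      rw [hih]
      simp [bLen, hceq]
      ring

lemma chunkN_len_full (cs : List Char) (I j : Nat) (h : (j + 1) * I ≤ cs.length) :
    (chunkN cs I j).length = I := by
  rw [add_mul, one_mul] at h
  simp [chunkN]
  omega

lemma rleLenFrom_eq_bLen (cs : List Char) (I : Nat) (hI : 0 < I) :
    ∀ (d j : Nat) (run : Nat), j + 1 + d = cs.length / I →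
    rleLenFrom (chunkN cs I j) run
        ((List.range' (j + 1) d).map (chunkN cs I)
          ++ (if cs.length % I = 0 then [] else [chunkN cs I (cs.length / I)]))
      = bLen I run (eqsL cs I j d) + ((cs.length % I : Nat) : Int) := by
  intro d
  induction d with
  | zero =>
    intro j run hF
    have hjlen : (j + 1) * I ≤ cs.length := by
      rw [show j + 1 = cs.length / I from by omega]
      exact Nat.div_mul_le_self _ _
    have hlfull := chunkN_len_full cs I j hjlen
    have hrem : cs.length % I < I := Nat.mod_lt _ hI
    have hdm := Nat.div_add_mod cs.length I
    simp only [List.range'_zero, List.map_nil, List.nil_append]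
    by_cases h0 : cs.length % I = 0
    · rw [if_pos h0]
      simp only [rleLenFrom, eqsL, List.range'_zero, List.map_nil, bLen]
      rw [h0]
      simp only [Nat.cast_zero, add_zero]
      unfold emitLen emitI
      rw [hlfull]
    · rw [if_neg h0]
      have hltail : (chunkN cs I (cs.length / I)).length = cs.length % I := by
        have hcomm : I * (cs.length / I) = cs.length / I * I := Nat.mul_comm _ _
        simp [chunkN]
        omega
      have hne : chunkN cs I j ≠ chunkN cs I (cs.length / I) := by
        intro h
        rw [← h, hlfull] at hltail
        omega
      simp only [rleLenFrom, if_neg hne, eqsL, List.range'_zero, List.map_nil, bLen]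
      unfold emitLen emitI
      rw [hlfull, hltail]
      simp
  | succ d ih =>
    intro j run hF
    have hjlen : (j + 1) * I ≤ cs.length := by
      calc (j + 1) * I ≤ (cs.length / I) * I := Nat.mul_le_mul_right _ (by omega)
        _ ≤ cs.length := Nat.div_mul_le_self _ _
    have hlfull := chunkN_len_full cs I j hjlen
    rw [List.range'_succ, List.map_cons, List.cons_append]
    have heqs : eqsL cs I j (d + 1)
        = (decide (chunkN cs I j = chunkN cs I (j + 1))) :: eqsL cs I (j + 1) d := by
      unfold eqsL
      rw [List.range'_succ, List.map_cons]
    rw [heqs]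
    by_cases hceq : chunkN cs I j = chunkN cs I (j + 1)
    · rw [show (decide (chunkN cs I j = chunkN cs I (j + 1))) = true from by simp [hceq]]
      simp only [rleLenFrom, if_pos hceq, bLen, if_true]
      rw [hceq]
      exact ih (j + 1) (run + 1) (by omega)
    · rw [show (decide (chunkN cs I j = chunkN cs I (j + 1))) = false from by simp [hceq]]
      simp only [rleLenFrom, if_neg hceq, bLen, Bool.false_eq_true, if_false]
      rw [ih (j + 1) 1 (by omega)]
      unfold emitLen emitI
      rw [hlfull]
      ring

lemma inner_eq (cs : List Char) (I : Nat) (hI : 1 ≤ I) (h2 : 2 * I ≤ cs.length) :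
    postLen ((PySem.List.pyRange 0 (cs.length : Int) (I : Int)).foldl
        (aStep cs (I : Int)) ([], [], 1, []))
      = finB I ((PySem.List.pyRange 0
            ((cs.length : Int) - PySem.Int.mod (cs.length : Int) (I : Int) - (I : Int)) 1).foldl
          (bInner cs (I : Int)) (PySem.Int.mod (cs.length : Int) (I : Int), 1, 0)) := by
  have hN0 : 0 < cs.length := by omega
  have hdm : cs.length / I * I + cs.length % I = cs.length := by
    rw [Nat.mul_comm]; exact Nat.div_add_mod _ _
  have hrlt : cs.length % I < I := Nat.mod_lt _ (by omega)
  have hF2 : 2 ≤ cs.length / I := (Nat.le_div_iff_mul_le (by omega)).mpr (by omega)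
  have eFI : I ≤ cs.length / I * I := by
    calc I = 1 * I := (one_mul I).symm
    _ ≤ cs.length / I * I := Nat.mul_le_mul_right _ (by omega)
  have hmod : PySem.Int.mod (cs.length : Int) (I : Int) = ((cs.length % I : Nat) : Int) := by
    exact_mod_cast PySem.Int.mod_natCast cs.length I
  have e2 : (cs.length / I - 1) * I = cs.length / I * I - I := by rw [Nat.sub_mul, one_mul]
  have hrange : (cs.length : Int) - ((cs.length % I : Nat) : Int) - (I : Int)
      = (((cs.length / I - 1) * I : Nat) : Int) := by
    rw [e2]; omega
  have e4 : (cs.length / I + 1) * I = cs.length / I * I + I := by ring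
  have hMF : (cs.length + I - 1) / I
      = if cs.length % I = 0 then cs.length / I else cs.length / I + 1 := by
    by_cases h0 : cs.length % I = 0
    · rw [if_pos h0]
      have hx : cs.length + I - 1 = (I - 1) + cs.length / I * I := by omega
      rw [hx, Nat.add_mul_div_right _ _ (by omega : 0 < I), Nat.div_eq_of_lt (by omega)]
      omega
    · rw [if_neg h0]
      have hx : cs.length + I - 1 = (cs.length % I - 1) + (cs.length / I + 1) * I := by omega
      rw [hx, Nat.add_mul_div_right _ _ (by omega : 0 < I), Nat.div_eq_of_lt (by omega)]
      omega
  -- ===== A side: peel the first chunk =====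
  have hsplit0 : PySem.List.pyRange 0 (cs.length : Int) (I : Int)
      = 0 :: PySem.List.pyRange (I : Int) (cs.length : Int) (I : Int) := by
    have := pyRange_pos_cons 0 (cs.length : Int) (I : Int)
      (by exact_mod_cast (by omega : 0 < I)) (by exact_mod_cast hN0)
    rwa [zero_add] at this
  have hchunks := chunks_eq cs I (by omega) hN0
  rw [hsplit0, List.map_cons] at hchunks
  have hMpos : 1 ≤ (cs.length + I - 1) / I := by rw [hMF]; split_ifs <;> omega
  have hrangeM : List.range ((cs.length + I - 1) / I)
      = 0 :: List.range' 1 ((cs.length + I - 1) / I - 1) := by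
    rw [List.range_eq_range',
      show (cs.length + I - 1) / I = ((cs.length + I - 1) / I - 1) + 1 from by omega,
      List.range'_succ]
    simp
  rw [hrangeM, List.map_cons] at hchunks
  obtain ⟨hc0, hrest⟩ := List.cons_eq_cons.mp hchunks
  rw [hsplit0, List.foldl_cons]
  have hfirst : aStep cs (I : Int) ([], [], 1, []) 0
      = ([], PySem.List.slice cs (some 0) (some (0 + (I : Int))), 1,
         PySem.List.slice cs (some 0) (some (0 + (I : Int)))) := by
    simp [aStep]
  rw [hfirst]
  have hcongr : ∀ (acc : List Char × List Char × Int × List Char),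
      ∀ x ∈ PySem.List.pyRange (I : Int) (cs.length : Int) (I : Int),
      aStep cs (I : Int) acc x = aStep' acc (PySem.List.slice cs (some x) (some (x + (I : Int)))) := by
    intro acc x hx
    have hx' := (PySem.List.mem_pyRange_iff_of_pos
      (by exact_mod_cast (by omega : 0 < I) : (0:Int) < (I : Int)) x).1 hx
    have hIx : (1 : Int) ≤ (I : Int) := by exact_mod_cast hI
    have hx0 : ¬ (x = 0) := by omega
    simp [aStep, aStep', hx0]
  rw [PySem.List.foldl_congr_mem _ _ _ _ hcongr, ← List.foldl_map]
  rw [hrest, hc0]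
  have hA := aStep'_foldl_postLen ((List.range' 1 ((cs.length + I - 1) / I - 1)).map (chunkN cs I))
    [] (chunkN cs I 0) 1 (le_refl _)
  rw [Nat.cast_one] at hA
  rw [hA]
  simp only [List.length_nil, Nat.cast_zero, zero_add]
  have hlist : (List.range' 1 ((cs.length + I - 1) / I - 1)).map (chunkN cs I)
      = (List.range' (0 + 1) (cs.length / I - 1)).map (chunkN cs I)
        ++ (if cs.length % I = 0 then [] else [chunkN cs I (cs.length / I)]) := by
    by_cases h0 : cs.length % I = 0
    · rw [if_pos h0, List.append_nil]
      rw [hMF, if_pos h0]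
    · rw [if_neg h0]
      have hstep : (cs.length + I - 1) / I - 1 = (cs.length / I - 1) + 1 := by
        rw [hMF, if_neg h0]; omega
      rw [hstep, List.range'_concat, List.map_append]
      norm_num
      rw [show 1 + (cs.length / I - 1) = cs.length / I from by omega]
  rw [hlist, rleLenFrom_eq_bLen cs I (by omega) (cs.length / I - 1) 0 1 (by omega)]
  -- ===== B side =====
  rw [hmod, hrange]
  have hB := bInner_blocks cs I (by omega) (cs.length / I - 1) 0
    ((cs.length % I : Nat) : Int) 1 (le_refl _)
    (by rw [show 0 + (cs.length / I - 1) + 1 = cs.length / I from by omega]; omega)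
  simp only [Nat.zero_mul, Nat.zero_add, Nat.cast_zero, Nat.cast_one] at hB
  rw [hB]
  exact add_comm _ _

theorem main_thm (s : String) : solution s = solution_alt s := by
  unfold solution solution_alt
  apply PySem.List.foldl_congr_mem
  intro answer i hi
  have hi' := PySem.List.mem_pyRange_one.1 hi
  have h2i : i ≤ PySem.Int.floordiv (PySem.Str.len s) 2 := by omega
  have hn2 : i * 2 ≤ PySem.Str.len s :=
    (PySem.Int.le_floordiv_iff_mul_le (by omega : (0:Int) < 2)).1 h2i
  obtain ⟨I, hIeq, hI1⟩ : ∃ I : Nat, i = (I : Int) ∧ 1 ≤ I :=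
    ⟨i.toNat, by omega, by omega⟩
  subst hIeq
  have h2 : 2 * I ≤ s.toList.length := by
    rw [PySem.Str.len_eq] at hn2
    exact_mod_cast (by omega : ((2 * I : Nat) : Int) ≤ (s.toList.length : Int))
  have key := inner_eq s.toList I hI1 h2
  simp only [postLen, finB] at key
  simp only [PySem.Str.len_eq, gt_iff_lt]
  rw [key]
  simp only [PySem.Str.len_eq, gt_iff_lt]

-- ===== VERDICT (by name: the statement is the Claim_ definition above) =====
theorem solution_spec : Claim_equal_solution := by
  intro s _
  exact main_thm s
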